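-- pv_equiv track=rewrite | github.com/dincrash/PYTHON-BASIC | practice/1_python_part_1/task4.py | calculate_power_with_difference
-- ===== SOURCE A (Python) =====
-- from typing import List
--
-- def calculate_power_with_difference(ints: List[int]) -> List[int]:
--     """
--     calc
--     """
--     previous = 0
--     output = []
--     for integer in iter(ints):
--         now = (pow(integer, 2) - (pow(previous, 2) - previous))
--         previous = integer
--         output.append(now)
--     return output
-- ===== SOURCE B (Python) =====
-- from typing import List
--
-- def calculate_power_with_difference(ints: List[int]) -> List[int]:
--     out = []
--     for i in range(len(ints) - 1, -1, -1):
--         p = ints[i - 1] if i > 0 else 0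
--         out.append(ints[i] * ints[i] - (p * p - p))
--     out.reverse()
--     return out
-- ===== Notes on version B (the rewrite author's own statement) =====
-- stated objective: alternative
-- what changed: B walks the indices back-to-front (range(len-1,-1,-1)), reads each element and its predecessor by index instead of threading a running `previous` accumulator across iterations, and reverses the collected results at the end.
import Mathlib
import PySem

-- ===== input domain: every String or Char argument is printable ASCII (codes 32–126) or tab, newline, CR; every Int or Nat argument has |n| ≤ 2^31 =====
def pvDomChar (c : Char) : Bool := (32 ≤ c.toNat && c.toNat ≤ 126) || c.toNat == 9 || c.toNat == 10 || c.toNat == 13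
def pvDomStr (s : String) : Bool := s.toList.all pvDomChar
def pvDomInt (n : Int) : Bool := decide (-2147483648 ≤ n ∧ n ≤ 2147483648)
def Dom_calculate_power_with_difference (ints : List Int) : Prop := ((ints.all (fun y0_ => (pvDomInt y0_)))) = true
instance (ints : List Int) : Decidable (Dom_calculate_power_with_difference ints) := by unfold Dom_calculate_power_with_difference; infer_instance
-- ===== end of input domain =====

-- B walks the indices back-to-front and reads predecessors by index instead of threading a running `previous` (objective: alternative).
-- ===== PORT A =====
-- loop: for integer in ints, threading `previous` and appending to `output`
def pvGoA (prev : Int) (acc : List Int) : List Int → List Int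
  | [] => acc
  | x :: xs => pvGoA x (acc ++ [x ^ 2 - (prev ^ 2 - prev)]) xs

def calculate_power_with_difference (ints : List Int) : List Int :=
  pvGoA 0 [] ints

-- ===== PORT B =====
-- for i in range(len(ints)-1, -1, -1): p = ints[i-1] if i > 0 else 0; out.append(...); out.reverse()
-- indices are always in range, so ints[i] is ported as pyGetD ints i 0 (exact on in-range indices)
def pvStepB (ints : List Int) (acc : List Int) (i : Int) : List Int :=
  let p := if i > 0 then PySem.List.pyGetD ints (i - 1) 0 else 0
  acc ++ [PySem.List.pyGetD ints i 0 * PySem.List.pyGetD ints i 0 - (p * p - p)]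

def calculate_power_with_difference_alt (ints : List Int) : List Int :=
  ((PySem.List.pyRange ((ints.length : Int) - 1) (-1) (-1)).foldl (pvStepB ints) []).reverse

-- ===== PRECONDITION & SPEC =====
def Spec_calculate_power_with_difference (ints : List Int) (out : List Int) : Prop := out = calculate_power_with_difference_alt ints
instance (ints : List Int) (out : List Int) : Decidable (Spec_calculate_power_with_difference ints out) := by unfold Spec_calculate_power_with_difference; infer_instance

-- ===== CLAIM (what is proved, stated in full; the proofs are below) =====
def Claim_equal_calculate_power_with_difference : Prop := ∀ (ints : List Int), Dom_calculate_power_with_difference ints → Spec_calculate_power_with_difference ints (calculate_power_with_difference ints)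

-- ===== LEMMAS AND PROOFS =====

-- ===== VERDICT (by name: the statement is the Claim_ definition above) =====
-- the common functional specification: the cons-level recursion both programs compute
def pvSpec : Int → List Int → List Int
  | _, [] => []
  | prev, x :: xs => (x * x - (prev * prev - prev)) :: pvSpec x xs

theorem pvGoA_eq (xs : List Int) : ∀ (prev : Int) (acc : List Int),
    pvGoA prev acc xs = acc ++ pvSpec prev xs := by
  induction xs with
  | nil => intro prev acc; simp [pvGoA, pvSpec]
  | cons y ys ih =>
    intro prev acc
    simp only [pvGoA, pvSpec, ih, List.append_assoc, List.singleton_append]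
    ring_nf

theorem pvFoldl_append (h : Int → Int) (l : List Int) : ∀ (acc : List Int),
    l.foldl (fun a i => a ++ [h i]) acc = acc ++ l.map (fun i => h i) := by
  induction l with
  | nil => intro acc; simp
  | cons y ys ih => intro acc; simp [List.foldl, ih]

theorem pvSpec_length (xs : List Int) : ∀ prev, (pvSpec prev xs).length = xs.length := by
  induction xs with
  | nil => intro prev; rfl
  | cons y ys ih => intro prev; simp [pvSpec, ih]

theorem pvSpec_getElem (xs : List Int) : ∀ (prev : Int) (k : Nat) (hk : k < xs.length),
    (pvSpec prev xs)[k]'(by rw [pvSpec_length]; exact hk) =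
      xs.getD k 0 * xs.getD k 0 -
        ((if k = 0 then prev else xs.getD (k - 1) 0) * (if k = 0 then prev else xs.getD (k - 1) 0) -
          (if k = 0 then prev else xs.getD (k - 1) 0)) := by
  induction xs with
  | nil => intro prev k hk; simp at hk
  | cons y ys ih =>
    intro prev k hk
    cases k with
    | zero => simp [pvSpec]
    | succ n =>
      simp only [pvSpec, List.getElem_cons_succ]
      rw [ih y n (by simpa using hk)]
      cases n with
      | zero => simp
      | succ m => simp

theorem pvB_eq (ints : List Int) :
    calculate_power_with_difference_alt ints = pvSpec 0 ints := by
  unfold calculate_power_with_difference_alt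
  have hrev : PySem.List.pyRange ((ints.length : Int) - 1) (-1) (-1)
      = (PySem.List.pyRange 0 (ints.length : Int) 1).reverse := by
    rw [PySem.List.pyRange_neg_one_eq_reverse]; norm_num
  rw [hrev]
  have hstep : pvStepB ints = (fun a i => a ++ [(fun j => PySem.List.pyGetD ints j 0 * PySem.List.pyGetD ints j 0 -
      ((if j > 0 then PySem.List.pyGetD ints (j - 1) 0 else 0) * (if j > 0 then PySem.List.pyGetD ints (j - 1) 0 else 0) -
        (if j > 0 then PySem.List.pyGetD ints (j - 1) 0 else 0))) i]) := by
    funext a i; simp [pvStepB]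
  rw [hstep, pvFoldl_append]
  simp only [List.nil_append, List.map_reverse, List.reverse_reverse]
  apply List.ext_getElem
  · rw [List.length_map, PySem.List.length_pyRange_one, pvSpec_length]; omega
  · intro k hk hk2
    have hkn : k < ints.length := by
      simpa [PySem.List.length_pyRange_one] using hk
    rw [List.getElem_map]
    rw [pvSpec_getElem ints 0 k hkn]
    have hidx : (PySem.List.pyRange 0 (ints.length : Int) 1)[k]'(by
        rw [PySem.List.length_pyRange_one]; omega) = (k : Int) := by
      rw [PySem.List.getElem_pyRange_one]; omega
    rw [hidx]
    have hget : PySem.List.pyGetD ints (k : Int) 0 = ints.getD k 0 := by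
      simp [PySem.List.pyGetD_natCast]
    rw [hget]
    cases k with
    | zero => norm_num
    | succ m =>
      have h1 : ((m + 1 : Nat) : Int) > 0 := by positivity
      rw [if_pos h1, if_neg (Nat.succ_ne_zero m)]
      have h2 : ((m + 1 : Nat) : Int) - 1 = (m : Int) := by push_cast; ring
      rw [h2]
      simp [PySem.List.pyGetD_natCast]

-- ===== VERDICT (by name: the statement is the Claim_ definition above) =====
theorem calculate_power_with_difference_spec : Claim_equal_calculate_power_with_difference := by
  intro ints _
  show _ = _
  rw [calculate_power_with_difference, pvGoA_eq, pvB_eq, List.nil_append]
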